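-- pv_equiv track=rewrite | github.com/meethune/x4cat | x4_catalog/_validate.py | _split_root
-- ===== SOURCE A (Python) =====
-- def _split_root(xpath: str) -> tuple[str, str]:
--     """Split ``/root/rest`` into ``('root', 'rest')``.
--
--     Returns ``('root', '')`` if the path is just ``/root``.
--     Handles predicates on the root element: ``/root[@a='b']/rest`` ->
--     ``('root', 'rest')`` with predicates stripped from root tag.
--     """
--     path = xpath.lstrip("/")
--     # Find the end of the first path segment (could have predicates)
--     bracket_depth = 0
--     for i, ch in enumerate(path):
--         if ch == "[":
--             bracket_depth += 1
--         elif ch == "]":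
--             bracket_depth -= 1
--         elif ch == "/" and bracket_depth == 0:
--             return path[:i], path[i + 1 :]
--     return path, ""
-- ===== SOURCE B (Python) =====
-- def _split_root(xpath: str) -> tuple[str, str]:
--     """Split ``/root/rest`` into ``('root', 'rest')`` (segment-wise rewrite)."""
--     path = xpath.lstrip("/")
--     segments = path.split("/")
--     root = []
--     balance = 0
--     while segments:
--         seg = segments.pop(0)
--         root.append(seg)
--         balance += seg.count("[") - seg.count("]")
--         if balance == 0:
--             return "/".join(root), "/".join(segments)
--     return path, ""
-- ===== Notes on version B (the rewrite author's own statement) =====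
-- stated objective: alternative
-- what changed: Replaces the per-character indexed scan with early return by a segment-wise pass: split the path on '/', walk the segments keeping a running bracket balance, and rejoin root and rest with '/'.join.
import Mathlib
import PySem

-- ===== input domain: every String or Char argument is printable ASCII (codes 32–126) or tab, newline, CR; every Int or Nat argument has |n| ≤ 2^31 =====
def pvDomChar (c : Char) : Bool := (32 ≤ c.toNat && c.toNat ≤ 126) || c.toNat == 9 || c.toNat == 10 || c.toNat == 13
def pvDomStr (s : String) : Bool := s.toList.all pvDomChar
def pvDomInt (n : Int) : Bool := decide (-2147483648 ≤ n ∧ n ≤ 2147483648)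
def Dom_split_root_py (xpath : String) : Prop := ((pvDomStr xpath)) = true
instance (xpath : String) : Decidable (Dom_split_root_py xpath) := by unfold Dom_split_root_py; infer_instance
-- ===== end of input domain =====

-- B replaces A's indexed per-character scan (early return with slices) by a segment-wise
-- pass: split on '/', walk segments keeping a running bracket balance, rejoin with '/'.join.
-- Objective: alternative decomposition, same asymptotic cost.

-- ===== PORT A =====
-- the for-loop over enumerate(path) with state bracket_depth; early return yields the slices
def splitRootGoA (path : List Char) : Int → List (Int × Char) → List Char × List Char
  | _, [] => (path, [])
  | d, (i, ch) :: rest =>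
    if ch = '[' then splitRootGoA path (d + 1) rest
    else if ch = ']' then splitRootGoA path (d - 1) rest
    else if ch = '/' ∧ d = 0 then
      (PySem.List.slice path none (some i), PySem.List.slice path (some (i + 1)) none)
    else splitRootGoA path d rest

def split_root_py (xpath : String) : String × String :=
  -- xpath.lstrip("/") ported by hand (PySem has no lstrip-with-chars): exact, strips leading '/'
  let path := xpath.toList.dropWhile (fun c => c == '/')
  let r := splitRootGoA path 0 (PySem.List.enumerate path 0)
  (String.ofList r.1, String.ofList r.2)

-- ===== PORT B =====
-- hand port of path.split("/") (single non-empty separator; keeps empty pieces): exact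
def pySplitSlash : List Char → List (List Char)
  | [] => [[]]
  | c :: cs =>
    if c = '/' then [] :: pySplitSlash cs
    else
      match pySplitSlash cs with
      | [] => [[c]]   -- unreachable: pySplitSlash never returns []
      | s :: ss => (c :: s) :: ss

-- the while loop popping segments, appending to root, tracking the running balance
def splitRootGoB (path : List Char) : Int → List (List Char) → List (List Char) → List Char × List Char
  | _, _, [] => (path, [])
  | bal, root, seg :: segs =>
    let root' := root ++ [seg]
    let bal' := bal + (seg.count '[' : Int) - (seg.count ']' : Int)
    if bal' = 0 then (PySem.Chars.join ['/'] root', PySem.Chars.join ['/'] segs)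
    else splitRootGoB path bal' root' segs

def split_root_py_alt (xpath : String) : String × String :=
  let path := xpath.toList.dropWhile (fun c => c == '/')
  let r := splitRootGoB path 0 [] (pySplitSlash path)
  (String.ofList r.1, String.ofList r.2)

-- ===== PRECONDITION & SPEC =====
def Spec_split_root_py (xpath : String) (out : String × String) : Prop := out = split_root_py_alt xpath
instance (xpath : String) (out : String × String) : Decidable (Spec_split_root_py xpath out) := by unfold Spec_split_root_py; infer_instance

-- ===== CLAIM (what is proved, stated in full; the proofs are below) =====
def Claim_equal_split_root_py : Prop := ∀ (xpath : String), Dom_split_root_py xpath → Spec_split_root_py xpath (split_root_py xpath)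

-- ===== LEMMAS AND PROOFS =====

-- canonical per-character recursion equivalent to A's scan on the remaining characters
def fA : Int → List Char → List Char × List Char
  | _, [] => ([], [])
  | d, c :: cs =>
    if c = '[' then (c :: (fA (d + 1) cs).1, (fA (d + 1) cs).2)
    else if c = ']' then (c :: (fA (d - 1) cs).1, (fA (d - 1) cs).2)
    else if c = '/' ∧ d = 0 then ([], cs)
    else (c :: (fA d cs).1, (fA d cs).2)

-- segment-level recursion equivalent to B's loop: none = balance never returned to 0
def gB : Int → List (List Char) → Option (List (List Char) × List (List Char))
  | _, [] => none
  | bal, seg :: segs =>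
    let bal' := bal + (seg.count '[' : Int) - (seg.count ']' : Int)
    if bal' = 0 then some ([seg], segs)
    else (gB bal' segs).map (fun p => (seg :: p.1, p.2))

lemma pySplitSlash_ne_nil (cs : List Char) : pySplitSlash cs ≠ [] := by
  induction cs with
  | nil => simp [pySplitSlash]
  | cons c cs ih =>
    simp only [pySplitSlash]
    split
    · simp
    · match h : pySplitSlash cs with
      | [] => simp
      | s :: ss => simp

lemma intercalate_singleton (s : List Char) : List.intercalate ['/'] [s] = s := by
  simp [List.intercalate]

lemma intercalate_cons_of_ne_nil (s : List Char) (r : List (List Char)) (h : r ≠ []) :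
    List.intercalate ['/'] (s :: r) = s ++ '/' :: List.intercalate ['/'] r := by
  match r with
  | [] => exact absurd rfl h
  | t :: ts => simp [List.intercalate, List.intersperse]

lemma intercalate_cons_head (c : Char) (s : List Char) (ss : List (List Char)) :
    List.intercalate ['/'] ((c :: s) :: ss) = c :: List.intercalate ['/'] (s :: ss) := by
  match ss with
  | [] => simp [intercalate_singleton]
  | t :: ts =>
    rw [intercalate_cons_of_ne_nil (c :: s) (t :: ts) (by simp),
        intercalate_cons_of_ne_nil s (t :: ts) (by simp)]
    simp

lemma intercalate_pySplitSlash (cs : List Char) :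
    List.intercalate ['/'] (pySplitSlash cs) = cs := by
  induction cs with
  | nil => simp [pySplitSlash, intercalate_singleton]
  | cons c cs ih =>
    simp only [pySplitSlash]
    by_cases hc : c = '/'
    · rw [if_pos hc, intercalate_cons_of_ne_nil [] _ (pySplitSlash_ne_nil cs), ih, hc]
      rfl
    · rw [if_neg hc]
      match h : pySplitSlash cs with
      | [] => exact absurd h (pySplitSlash_ne_nil cs)
      | s :: ss =>
        rw [h] at ih
        rw [intercalate_cons_head, ih]

lemma no_slash_pySplitSlash (cs : List Char) : ∀ s ∈ pySplitSlash cs, '/' ∉ s := by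
  induction cs with
  | nil => simp [pySplitSlash]
  | cons c cs ih =>
    simp only [pySplitSlash]
    by_cases hc : c = '/'
    · rw [if_pos hc]
      intro s hs
      rcases List.mem_cons.mp hs with h | h
      · simp [h]
      · exact ih s h
    · rw [if_neg hc]
      match h : pySplitSlash cs with
      | [] => exact absurd h (pySplitSlash_ne_nil cs)
      | s :: ss =>
        rw [h] at ih
        intro t ht
        rcases List.mem_cons.mp ht with h' | h'
        · subst h'
          intro hmem
          rcases List.mem_cons.mp hmem with h'' | h''
          · exact hc h''.symm
          · exact ih s (by simp) h''
        · exact ih t (by simp [h'])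

lemma gB_cons_ne (d : Int) (s : List Char) (segs : List (List Char))
    (hb : ¬ d + (s.count '[' : Int) - (s.count ']' : Int) = 0) :
    gB d (s :: segs) = (gB (d + (s.count '[' : Int) - (s.count ']' : Int)) segs).map
      (fun p => (s :: p.1, p.2)) := by
  rw [gB, if_neg hb]

lemma gB_some_ne_nil : ∀ (segs : List (List Char)) (d : Int) (r rest : List (List Char)),
    gB d segs = some (r, rest) → r ≠ [] := by
  intro segs
  induction segs with
  | nil => intro d r rest h; simp [gB] at h
  | cons s ss ih =>
    intro d r rest h
    simp only [gB] at h
    split at h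
    · simp only [Option.some.injEq, Prod.mk.injEq] at h
      simp [← h.1]
    · match hg : gB (d + (s.count '[' : Int) - (s.count ']' : Int)) ss with
      | none => rw [hg] at h; simp at h
      | some (r', rest') =>
        rw [hg] at h
        simp only [Option.map_some, Option.some.injEq, Prod.mk.injEq] at h
        simp [← h.1]

-- A-side: the indexed scan over enumerate equals fA, with the consumed prefix reattached
lemma goA_eq (cs : List Char) : ∀ (pre : List Char) (d : Int),
    splitRootGoA (pre ++ cs) d (PySem.List.enumerate cs (pre.length : Int)) =
      (pre ++ (fA d cs).1, (fA d cs).2) := by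
  induction cs with
  | nil => intro pre d; simp [PySem.List.enumerate_nil, splitRootGoA, fA]
  | cons c cs ih =>
    intro pre d
    rw [PySem.List.enumerate_cons]
    simp only [splitRootGoA, fA]
    by_cases h1 : c = '['
    · rw [if_pos h1, if_pos h1]
      have := ih (pre ++ [c]) (d + 1)
      simpa [List.append_assoc, Nat.cast_add] using this
    · rw [if_neg h1, if_neg h1]
      by_cases h2 : c = ']'
      · rw [if_pos h2, if_pos h2]
        have := ih (pre ++ [c]) (d - 1)
        simpa [List.append_assoc, Nat.cast_add] using this
      · rw [if_neg h2, if_neg h2]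
        by_cases h3 : c = '/' ∧ d = 0
        · rw [if_pos h3, if_pos h3]
          have e1 : PySem.List.slice (pre ++ c :: cs) none (some (pre.length : Int)) = pre := by
            rw [PySem.List.slice_to _ (Int.natCast_nonneg _)]
            simp
          have e2 : PySem.List.slice (pre ++ c :: cs) (some ((pre.length : Int) + 1)) none = cs := by
            have hcast : ((pre.length : Int) + 1) = ((pre.length + 1 : Nat) : Int) := by push_cast; ring
            rw [hcast, PySem.List.slice_from _ (Int.natCast_nonneg _)]
            have hsplit : pre ++ c :: cs = (pre ++ [c]) ++ cs := by simp
            have hlen : ((pre.length + 1 : Nat) : Int).toNat = (pre ++ [c]).length := by simp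
            rw [hsplit, hlen, List.drop_left]
          rw [e1, e2]
          simp
        · rw [if_neg h3, if_neg h3]
          have := ih (pre ++ [c]) d
          simpa [List.append_assoc, Nat.cast_add] using this

-- fA passes through a '/'-free segment, folding its bracket balance into the depth
lemma fA_seg (s : List Char) : ∀ (d : Int) (rest : List Char), '/' ∉ s →
    fA d (s ++ rest) =
      (s ++ (fA (d + (s.count '[' : Int) - (s.count ']' : Int)) rest).1,
       (fA (d + (s.count '[' : Int) - (s.count ']' : Int)) rest).2) := by
  induction s with
  | nil => intro d rest _; simp
  | cons c s ih =>
    intro d rest hns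
    have hc : c ≠ '/' := fun h => hns (by simp [h])
    have hs : '/' ∉ s := fun h => hns (by simp [h])
    simp only [List.cons_append, fA]
    by_cases h1 : c = '['
    · rw [if_pos h1]
      have hL : (c :: s).count '[' = s.count '[' + 1 := by
        simp [h1]
      have hR : (c :: s).count ']' = s.count ']' := by
        simp [h1]
      have harg : d + ((c :: s).count '[' : Int) - ((c :: s).count ']' : Int)
          = (d + 1) + (s.count '[' : Int) - (s.count ']' : Int) := by
        rw [hL, hR]; push_cast; ring
      rw [harg, ih (d + 1) rest hs]
    · rw [if_neg h1]
      by_cases h2 : c = ']'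
      · rw [if_pos h2]
        have hL : (c :: s).count '[' = s.count '[' := by
          simp [h2]
        have hR : (c :: s).count ']' = s.count ']' + 1 := by
          simp [h2]
        have harg : d + ((c :: s).count '[' : Int) - ((c :: s).count ']' : Int)
            = (d - 1) + (s.count '[' : Int) - (s.count ']' : Int) := by
          rw [hL, hR]; push_cast; ring
        rw [harg, ih (d - 1) rest hs]
      · have h3 : ¬ (c = '/' ∧ d = 0) := fun h => hc h.1
        rw [if_neg h2, if_neg h3]
        have hL : (c :: s).count '[' = s.count '[' := by
          simp [List.count_cons, show (c == '[') = false from beq_eq_false_iff_ne.mpr h1]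
        have hR : (c :: s).count ']' = s.count ']' := by
          simp [List.count_cons, show (c == ']') = false from beq_eq_false_iff_ne.mpr h2]
        have harg : d + ((c :: s).count '[' : Int) - ((c :: s).count ']' : Int)
            = d + (s.count '[' : Int) - (s.count ']' : Int) := by rw [hL, hR]
        rw [harg, ih d rest hs]

-- fA on the rejoined segments, phrased through gB
lemma fA_gB (segs : List (List Char)) : ∀ d : Int, (∀ s ∈ segs, '/' ∉ s) →
    fA d (List.intercalate ['/'] segs) =
      (match gB d segs with
       | some (r, rest) => (List.intercalate ['/'] r, List.intercalate ['/'] rest)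
       | none => (List.intercalate ['/'] segs, [])) := by
  induction segs with
  | nil => intro d _; simp [gB, List.intercalate, fA]
  | cons s ss ih =>
    intro d hno
    have hs : '/' ∉ s := hno s (by simp)
    have hss : ∀ t ∈ ss, '/' ∉ t := fun t ht => hno t (by simp [ht])
    match ss with
    | [] =>
      rw [intercalate_singleton, show (s : List Char) = s ++ [] from by simp,
          fA_seg s d [] hs]
      simp only [List.append_nil]
      simp only [gB]
      by_cases hb : d + (s.count '[' : Int) - (s.count ']' : Int) = 0
      · rw [if_pos hb]
        simp [fA, List.intercalate]
      · rw [if_neg hb]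
        simp [fA]
    | t :: ts =>
      rw [intercalate_cons_of_ne_nil s (t :: ts) (by simp),
          show s ++ '/' :: List.intercalate ['/'] (t :: ts)
            = s ++ ('/' :: List.intercalate ['/'] (t :: ts)) from rfl,
          fA_seg s d _ hs]
      by_cases hb : d + (s.count '[' : Int) - (s.count ']' : Int) = 0
      · have hfa : fA (d + (s.count '[' : Int) - (s.count ']' : Int))
            ('/' :: List.intercalate ['/'] (t :: ts))
            = ([], List.intercalate ['/'] (t :: ts)) := by
          simp [fA, hb]
        rw [hfa]
        simp only [gB, if_pos hb]
        simp [intercalate_singleton]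
      · have hfa : fA (d + (s.count '[' : Int) - (s.count ']' : Int))
            ('/' :: List.intercalate ['/'] (t :: ts))
            = ('/' :: (fA (d + (s.count '[' : Int) - (s.count ']' : Int))
                 (List.intercalate ['/'] (t :: ts))).1,
               (fA (d + (s.count '[' : Int) - (s.count ']' : Int))
                 (List.intercalate ['/'] (t :: ts))).2) := by
          simp [fA, hb, show (('/' : Char) = '[') = False from by simp,
                show (('/' : Char) = ']') = False from by simp]
        rw [hfa, ih (d + (s.count '[' : Int) - (s.count ']' : Int)) hss]
        match hg : gB (d + (s.count '[' : Int) - (s.count ']' : Int)) (t :: ts) with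
        | none =>
          rw [gB_cons_ne _ _ _ hb, hg]
          simp
        | some (r, rest) =>
          rw [gB_cons_ne _ _ _ hb, hg]
          simp only [Option.map_some]
          rw [intercalate_cons_of_ne_nil s r (gB_some_ne_nil (t :: ts) _ r rest hg)]

-- B-side: the accumulating loop, phrased through gB
lemma goB_eq (segs : List (List Char)) : ∀ (d : Int) (root : List (List Char)) (path : List Char),
    splitRootGoB path d root segs =
      (match gB d segs with
       | some (r, rest) => (List.intercalate ['/'] (root ++ r), List.intercalate ['/'] rest)
       | none => (path, [])) := by
  induction segs with
  | nil => intro d root path; simp [splitRootGoB, gB]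
  | cons s ss ih =>
    intro d root path
    simp only [splitRootGoB, gB, PySem.Chars.join]
    by_cases hb : d + (s.count '[' : Int) - (s.count ']' : Int) = 0
    · rw [if_pos hb, if_pos hb]
    · rw [if_neg hb, if_neg hb]
      rw [ih]
      match hg : gB (d + (s.count '[' : Int) - (s.count ']' : Int)) ss with
      | none => simp
      | some (r, rest) => simp

-- the core equality on the stripped path
lemma core_eq (path : List Char) :
    splitRootGoA path 0 (PySem.List.enumerate path 0) =
      splitRootGoB path 0 [] (pySplitSlash path) := by
  have hA := goA_eq path [] 0
  simp only [List.nil_append, List.length_nil, Nat.cast_zero] at hA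
  rw [hA, goB_eq (pySplitSlash path) 0 [] path]
  have hsplit := intercalate_pySplitSlash path
  have hfa := fA_gB (pySplitSlash path) 0 (no_slash_pySplitSlash path)
  rw [hsplit] at hfa
  rw [hfa]
  match hg : gB 0 (pySplitSlash path) with
  | none => simp
  | some (r, rest) => simp

-- ===== VERDICT (by name: the statement is the Claim_ definition above) =====
theorem split_root_py_spec : Claim_equal_split_root_py := by
  intro xpath _
  unfold Spec_split_root_py split_root_py split_root_py_alt
  simp only [core_eq]
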